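-- pv_equiv track=rewrite | github.com/famedinap/Cripto-App | python_crpto/TurningGrill.py | desencriptar
-- ===== SOURCE A (Python) =====
-- def quitarespacios(texto):
--     for i in texto:
--         if i == ' ':
--             texto.remove(i)
--     return texto
--
-- def rotar(matriz):
--     rotada=[]
--     for i in range(len(matriz[0])):
--         rotada.append([])
--         for j in range(len(matriz)):
--             rotada[i].append(matriz[len(matriz)-1-j][i])
--     return rotada
--
-- def encolar(tamano,grilla,desencriptado,matriz):
--     for k in range(tamano):
--         for l in range(tamano):
--             if grilla[k][l]==0:
--                 desencriptado+=matriz[k][l]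
--     return desencriptado
--
-- def desencriptar(tamano,grilla,direccion,msg):
--
--     mensaje=quitarespacios(list(msg))
--     matriz=[[0 for x in range(tamano)]for y in range(tamano)]
--     desencriptado=[' ']
--     for i in range(tamano):
--         for j in range(tamano):
--             matriz[i][j]=mensaje.pop(0)
--     for i in range(4):
--         desencriptado = encolar(tamano,grilla,desencriptado,matriz)
--         grilla=rotar(grilla)
--         if direccion==2:
--             grilla=rotar(grilla)
--             grilla=rotar(grilla)
--     return desencriptado
-- ===== SOURCE B (Python) =====
-- # B: same space-stripping and matrix fill as A, but the four physical grille
-- # rotations are replaced by a fixed grille read through a coordinate transform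
-- # (per-pass rotation counts 0,1,2,3, or 0,3,2,1 when direccion == 2).
-- def quitarespacios(texto):
--     for i in texto:
--         if i == ' ':
--             texto.remove(i)
--     return texto
--
-- def celda(grilla, n, r, k, l):
--     if r == 0:
--         return grilla[k][l]
--     if r == 1:
--         return grilla[n - 1 - l][k]
--     if r == 2:
--         return grilla[n - 1 - k][n - 1 - l]
--     return grilla[l][n - 1 - k]
--
-- def desencriptar(tamano, grilla, direccion, msg):
--     mensaje = quitarespacios(list(msg))
--     matriz = [[0 for x in range(tamano)] for y in range(tamano)]
--     for i in range(tamano):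
--         for j in range(tamano):
--             matriz[i][j] = mensaje.pop(0)
--     desencriptado = [' ']
--     m = len(grilla)
--     rots = (0, 3, 2, 1) if direccion == 2 else (0, 1, 2, 3)
--     for r in rots:
--         for k in range(tamano):
--             for l in range(tamano):
--                 if celda(grilla, m, r, k, l) == 0:
--                     desencriptado += matriz[k][l]
--     return desencriptado
-- ===== Notes on version B (the rewrite author's own statement) =====
-- stated objective: alternative
-- what changed: B never materialises rotated grilles: it keeps the original grille fixed and reads it through a per-pass rotation coordinate map (rotation counts 0,1,2,3, or 0,3,2,1 when direccion==2), replacing A's 4 (or 12) physical rotar copies.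
-- outside the precondition, e.g. on desencriptar(1, [[0, 1]], 1, 'abc'): A returns [' ', 'a', 'a'], B returns [' ', 'a', 'a', 'a', 'a']
import Mathlib
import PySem

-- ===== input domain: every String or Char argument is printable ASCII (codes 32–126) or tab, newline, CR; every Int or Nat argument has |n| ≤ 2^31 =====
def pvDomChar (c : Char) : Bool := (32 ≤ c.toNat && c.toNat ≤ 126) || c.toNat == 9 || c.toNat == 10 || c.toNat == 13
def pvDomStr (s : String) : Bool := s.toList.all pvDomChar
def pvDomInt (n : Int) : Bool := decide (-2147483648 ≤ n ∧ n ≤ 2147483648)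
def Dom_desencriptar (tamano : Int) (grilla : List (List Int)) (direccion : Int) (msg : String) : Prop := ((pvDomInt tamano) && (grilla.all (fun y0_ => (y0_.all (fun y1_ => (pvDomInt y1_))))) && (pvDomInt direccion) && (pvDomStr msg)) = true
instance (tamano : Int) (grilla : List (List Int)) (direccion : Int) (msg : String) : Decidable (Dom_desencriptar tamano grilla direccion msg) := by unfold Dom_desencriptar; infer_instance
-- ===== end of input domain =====

-- B replaces A's physically rotated grille copies by a fixed grille read through a
-- per-pass rotation coordinate map; everything else (space stripping, matrix fill) is unchanged.

-- ===== PORT A =====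
-- grilla[k][l] / matriz[k][l]: 2-D subscript; the defaults are only reachable on
-- out-of-range indices, where Python raises (excluded by Pre_).
def pvIdx2 (g : List (List Int)) (k l : Int) : Int :=
  PySem.List.pyGetD (PySem.List.pyGetD g k []) l 0

def pvMat (m : List (List Char)) (k l : Int) : Char :=
  PySem.List.pyGetD (PySem.List.pyGetD m k []) l ' '

-- quitarespacios: 'for i in texto: if i == " ": texto.remove(i)' — CPython's for-loop
-- over a list it mutates advances a cursor idx over the shrinking list; texto.remove(' ')
-- removes the first space (present whenever the branch fires, so the getD default is dead).
def pvQuita (texto : List Char) (idx : Nat) : List Char :=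
  if h : idx < texto.length then
    if hsp : texto[idx] == ' ' then
      pvQuita ((PySem.List.remove? texto ' ').getD texto) (idx + 1)
    else pvQuita texto (idx + 1)
  else texto
termination_by texto.length - idx
decreasing_by
  · have hm : ' ' ∈ texto := by
      have h2 := List.getElem_mem h
      simp only [beq_iff_eq] at hsp
      rwa [hsp] at h2
    rw [PySem.List.remove?_eq_some_erase texto ' ' hm, Option.getD_some]
    have := List.length_erase_of_mem hm
    omega
  · omega

-- rotar: rotada[i][j] = matriz[len(matriz)-1-j][i]; matriz[0] on an empty list raises
-- in Python (headD default only reachable outside Pre_).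
def pvRotar (m : List (List Int)) : List (List Int) :=
  (PySem.List.pyRange 0 ((m.headD []).length : Int) 1).map (fun i =>
    (PySem.List.pyRange 0 (m.length : Int) 1).map (fun j =>
      pvIdx2 m ((m.length : Int) - 1 - j) i))

def pvEncolar (t : Int) (g : List (List Int)) (des : List String) (m : List (List Char)) : List String :=
  (PySem.List.pyRange 0 t 1).foldl (fun des k =>
    (PySem.List.pyRange 0 t 1).foldl (fun des l =>
      if pvIdx2 g k l == 0 then des ++ [String.ofList [pvMat m k l]] else des) des) des

-- matrix fill: matriz[i][j] = mensaje.pop(0); on an exhausted mensaje Python raises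
-- IndexError (excluded by Pre_), the 'none' branch leaves the state unchanged.
def pvFill (t : Int) (mensaje : List Char) : List (List Char) × List Char :=
  (PySem.List.pyRange 0 t 1).foldl (fun st i =>
    (PySem.List.pyRange 0 t 1).foldl (fun st j =>
      match PySem.List.pop? st.2 0 with
      | some (c, rest) => (st.1.set i.toNat ((st.1.getD i.toNat []).set j.toNat c), rest)
      | none => st) st)
    ((PySem.List.pyRange 0 t 1).map (fun _ => (PySem.List.pyRange 0 t 1).map (fun _ => ' ')), mensaje)

def desencriptar (tamano : Int) (grilla : List (List Int)) (direccion : Int) (msg : String) : List String :=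
  let mensaje := pvQuita msg.toList 0
  let matriz := (pvFill tamano mensaje).1
  ((List.range 4).foldl (fun (st : List String × List (List Int)) _ =>
    let des := pvEncolar tamano st.2 st.1 matriz
    let g := pvRotar st.2
    let g := if direccion == 2 then pvRotar (pvRotar g) else g
    (des, g)) ([" "], grilla)).1

-- ===== PORT B =====
-- celda(grilla, n, r, k, l): the grille cell the r-times-rotated grille shows at (k, l).
def pvCelda (g : List (List Int)) (n r k l : Int) : Int :=
  if r == 0 then pvIdx2 g k l
  else if r == 1 then pvIdx2 g (n - 1 - l) k
  else if r == 2 then pvIdx2 g (n - 1 - k) (n - 1 - l)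
  else pvIdx2 g l (n - 1 - k)

def desencriptar_alt (tamano : Int) (grilla : List (List Int)) (direccion : Int) (msg : String) : List String :=
  let mensaje := pvQuita msg.toList 0
  let matriz := (pvFill tamano mensaje).1
  let m : Int := (grilla.length : Int)
  let rots : List Int := if direccion == 2 then [0, 3, 2, 1] else [0, 1, 2, 3]
  rots.foldl (fun des r =>
    (PySem.List.pyRange 0 tamano 1).foldl (fun des k =>
      (PySem.List.pyRange 0 tamano 1).foldl (fun des l =>
        if pvCelda grilla m r k l == 0 then des ++ [String.ofList [pvMat matriz k l]] else des) des) des)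
    [" "]

-- ===== PRECONDITION & SPEC =====
-- pvRemCount counts the characters quitarespacios deletes: scanning msg left to right,
-- every space seen at the cursor is deleted and makes the cursor jump over the next character.
def pvRemCount : List Char → Nat
  | [] => 0
  | [c] => if c == ' ' then 1 else 0
  | c :: d :: t => if c == ' ' then 1 + pvRemCount t else pvRemCount (d :: t)

-- Pre_ restricts to the cipher's natural domain: a SQUARE grille at least as large as
-- tamano with a message that still fills the tamano×tamano matrix after space removal, or
-- tamano ≤ 0 with any grille the rotations accept (A then outputs only the seed).  It
-- excludes non-square grilles, where A's physical rotations truncate/reshape the grille —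
-- an accident of rotating a malformed grille.
def Pre_desencriptar (tamano : Int) (grilla : List (List Int)) (direccion : Int) (msg : String) : Prop :=
  (1 ≤ tamano ∧ tamano.toNat ≤ grilla.length ∧ (∀ row ∈ grilla, row.length = grilla.length) ∧
    tamano.toNat * tamano.toNat + pvRemCount msg.toList ≤ msg.toList.length)
  ∨ (tamano ≤ 0 ∧ grilla ≠ [] ∧ grilla.headD [] ≠ [] ∧
      ∀ row ∈ grilla, (grilla.headD []).length ≤ row.length)

instance (tamano : Int) (grilla : List (List Int)) (direccion : Int) (msg : String) : Decidable (Pre_desencriptar tamano grilla direccion msg) := by unfold Pre_desencriptar; infer_instance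

def pvWitness_desencriptar : Int × List (List Int) × Int × String := (2, [[0, 1], [1, 0]], 1, "abcd")

def Spec_desencriptar (tamano : Int) (grilla : List (List Int)) (direccion : Int) (msg : String) (out : List String) : Prop := out = desencriptar_alt tamano grilla direccion msg
instance (tamano : Int) (grilla : List (List Int)) (direccion : Int) (msg : String) (out : List String) : Decidable (Spec_desencriptar tamano grilla direccion msg out) := by unfold Spec_desencriptar; infer_instance

-- ===== CLAIM (what is proved, stated in full; the proofs are below) =====
def Claim_equal_desencriptar : Prop := ∀ (tamano : Int) (grilla : List (List Int)) (direccion : Int) (msg : String), Dom_desencriptar tamano grilla direccion msg → Pre_desencriptar tamano grilla direccion msg → Spec_desencriptar tamano grilla direccion msg (desencriptar tamano grilla direccion msg)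

-- ===== LEMMAS AND PROOFS =====

theorem pvRotar_shape (g : List (List Int)) (N : Nat) (hN : 1 ≤ N)
    (hg : g.length = N) (hrow : ∀ row ∈ g, row.length = N) :
    (pvRotar g).length = N ∧ ∀ row ∈ pvRotar g, row.length = N := by
  have hne : g ≠ [] := by intro h; subst h; simp at hg; omega
  have hhead : (g.headD []).length = N := hrow _ (by cases g with
    | nil => exact absurd rfl hne
    | cons a t => simp)
  constructor
  · simp only [pvRotar, List.length_map, PySem.List.length_pyRange_one, hhead]
    omega
  · intro row hr
    simp only [pvRotar, List.mem_map] at hr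
    obtain ⟨i, _, rfl⟩ := hr
    simp only [List.length_map, PySem.List.length_pyRange_one, hg]
    omega

theorem pvRotar_cell (g : List (List Int)) (N : Nat) (hN : 1 ≤ N)
    (hg : g.length = N) (hrow : ∀ row ∈ g, row.length = N)
    (k l : Int) (hk0 : 0 ≤ k) (hk : k < (N : Int)) (hl0 : 0 ≤ l) (hl : l < (N : Int)) :
    pvIdx2 (pvRotar g) k l = pvIdx2 g ((N : Int) - 1 - l) k := by
  have hne : g ≠ [] := by intro h; subst h; simp at hg; omega
  have hhead : (g.headD []).length = N := hrow _ (by cases g with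
    | nil => exact absurd rfl hne
    | cons a t => simp)
  show PySem.List.pyGetD (PySem.List.pyGetD (pvRotar g) k []) l 0 = _
  unfold pvRotar
  rw [hhead, hg]
  rw [PySem.List.pyGetD_map_pyRange_of_nonneg _ _ _ _ hk0 hk]
  rw [PySem.List.pyGetD_map_pyRange_of_nonneg _ _ _ _ hl0 hl]

theorem pvRotar_cell3 (g : List (List Int)) (N : Nat) (hN : 1 ≤ N)
    (hg : g.length = N) (hrow : ∀ row ∈ g, row.length = N)
    (k l : Int) (hk0 : 0 ≤ k) (hk : k < (N : Int)) (hl0 : 0 ≤ l) (hl : l < (N : Int)) :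
    pvIdx2 (pvRotar (pvRotar (pvRotar g))) k l = pvIdx2 g l ((N : Int) - 1 - k) := by
  obtain ⟨h1l, h1r⟩ := pvRotar_shape g N hN hg hrow
  obtain ⟨h2l, h2r⟩ := pvRotar_shape _ N hN h1l h1r
  rw [pvRotar_cell _ N hN h2l h2r k l hk0 hk hl0 hl]
  rw [pvRotar_cell _ N hN h1l h1r ((N : Int) - 1 - l) k (by omega) (by omega) hk0 hk]
  rw [pvRotar_cell g N hN hg hrow ((N : Int) - 1 - k) ((N : Int) - 1 - l) (by omega) (by omega) (by omega) (by omega)]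
  have he : (N : Int) - 1 - ((N : Int) - 1 - l) = l := by omega
  rw [he]

theorem dfold_congr (R : List Int) (C C' : Int → Int → Int) (E : Int → Int → List String)
    (h : ∀ k ∈ R, ∀ l ∈ R, C k l = C' k l) (des : List String) :
    R.foldl (fun d k => R.foldl (fun d l => if C k l == 0 then d ++ E k l else d) d) des
    = R.foldl (fun d k => R.foldl (fun d l => if C' k l == 0 then d ++ E k l else d) d) des := by
  apply PySem.List.foldl_congr_mem
  intro acc k hk
  apply PySem.List.foldl_congr_mem
  intro acc2 l hl
  rw [h k hk l hl]

-- ===== VERDICT (by name: the statement is the Claim_ definition above) =====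
theorem desencriptar_spec : Claim_equal_desencriptar := by
  intro tamano grilla direccion msg _hDom hPre
  unfold Spec_desencriptar desencriptar desencriptar_alt
  have h4 : List.range 4 = [0, 1, 2, 3] := by decide
  rcases hPre with ⟨h1, htm, hrow, _hmsg⟩ | ⟨h0, -, -, -⟩
  · -- square grille, at least tamano × tamano
    set N := grilla.length with hNdef
    have hg : grilla.length = N := hNdef.symm
    have hN : 1 ≤ N := by omega
    have htN : tamano ≤ (N : Int) := by omega
    obtain ⟨s1l, s1r⟩ := pvRotar_shape grilla N hN hg hrow
    obtain ⟨s2l, s2r⟩ := pvRotar_shape _ N hN s1l s1r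
    obtain ⟨s3l, s3r⟩ := pvRotar_shape _ N hN s2l s2r
    obtain ⟨s4l, s4r⟩ := pvRotar_shape _ N hN s3l s3r
    obtain ⟨s5l, s5r⟩ := pvRotar_shape _ N hN s4l s4r
    obtain ⟨s6l, s6r⟩ := pvRotar_shape _ N hN s5l s5r
    rw [h4]
    set M := (pvFill tamano (pvQuita msg.toList 0)).1 with hM
    have p0 : ∀ des, pvEncolar tamano grilla des M =
        (PySem.List.pyRange 0 tamano 1).foldl (fun des k => (PySem.List.pyRange 0 tamano 1).foldl (fun des l => if pvCelda grilla (N : Int) 0 k l == 0 then des ++ [String.ofList [pvMat M k l]] else des) des) des := by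
      intro des
      unfold pvEncolar
      refine dfold_congr _ _ _ _ ?_ des
      intro k hk l hl
      simp only [pvCelda, BEq.rfl, if_true]
    have p1 : ∀ des, pvEncolar tamano (pvRotar grilla) des M =
        (PySem.List.pyRange 0 tamano 1).foldl (fun des k => (PySem.List.pyRange 0 tamano 1).foldl (fun des l => if pvCelda grilla (N : Int) 1 k l == 0 then des ++ [String.ofList [pvMat M k l]] else des) des) des := by
      intro des
      unfold pvEncolar
      refine dfold_congr _ _ _ _ ?_ des
      intro k hk l hl
      rw [PySem.List.mem_pyRange_one] at hk hl
      rw [pvRotar_cell grilla N hN hg hrow k l hk.1 (by omega) hl.1 (by omega)]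
      simp only [pvCelda]
      norm_num
    have p2 : ∀ des, pvEncolar tamano (pvRotar (pvRotar grilla)) des M =
        (PySem.List.pyRange 0 tamano 1).foldl (fun des k => (PySem.List.pyRange 0 tamano 1).foldl (fun des l => if pvCelda grilla (N : Int) 2 k l == 0 then des ++ [String.ofList [pvMat M k l]] else des) des) des := by
      intro des
      unfold pvEncolar
      refine dfold_congr _ _ _ _ ?_ des
      intro k hk l hl
      rw [PySem.List.mem_pyRange_one] at hk hl
      rw [pvRotar_cell _ N hN s1l s1r k l hk.1 (by omega) hl.1 (by omega)]
      rw [pvRotar_cell grilla N hN hg hrow ((N : Int) - 1 - l) k (by omega) (by omega) hk.1 (by omega)]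
      simp only [pvCelda]
      norm_num
    have p3 : ∀ des, pvEncolar tamano (pvRotar (pvRotar (pvRotar grilla))) des M =
        (PySem.List.pyRange 0 tamano 1).foldl (fun des k => (PySem.List.pyRange 0 tamano 1).foldl (fun des l => if pvCelda grilla (N : Int) 3 k l == 0 then des ++ [String.ofList [pvMat M k l]] else des) des) des := by
      intro des
      unfold pvEncolar
      refine dfold_congr _ _ _ _ ?_ des
      intro k hk l hl
      rw [PySem.List.mem_pyRange_one] at hk hl
      rw [pvRotar_cell3 grilla N hN hg hrow k l hk.1 (by omega) hl.1 (by omega)]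
      simp only [pvCelda]
      norm_num
    have q2 : ∀ des, pvEncolar tamano (pvRotar (pvRotar (pvRotar (pvRotar (pvRotar (pvRotar grilla)))))) des M =
        (PySem.List.pyRange 0 tamano 1).foldl (fun des k => (PySem.List.pyRange 0 tamano 1).foldl (fun des l => if pvCelda grilla (N : Int) 2 k l == 0 then des ++ [String.ofList [pvMat M k l]] else des) des) des := by
      intro des
      unfold pvEncolar
      refine dfold_congr _ _ _ _ ?_ des
      intro k hk l hl
      rw [PySem.List.mem_pyRange_one] at hk hl
      rw [pvRotar_cell3 _ N hN s3l s3r k l hk.1 (by omega) hl.1 (by omega)]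
      rw [pvRotar_cell3 grilla N hN hg hrow l ((N : Int) - 1 - k) hl.1 (by omega) (by omega) (by omega)]
      simp only [pvCelda]
      norm_num
    have q1 : ∀ des, pvEncolar tamano (pvRotar (pvRotar (pvRotar (pvRotar (pvRotar (pvRotar (pvRotar (pvRotar (pvRotar grilla))))))))) des M =
        (PySem.List.pyRange 0 tamano 1).foldl (fun des k => (PySem.List.pyRange 0 tamano 1).foldl (fun des l => if pvCelda grilla (N : Int) 1 k l == 0 then des ++ [String.ofList [pvMat M k l]] else des) des) des := by
      intro des
      unfold pvEncolar
      refine dfold_congr _ _ _ _ ?_ des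
      intro k hk l hl
      rw [PySem.List.mem_pyRange_one] at hk hl
      rw [pvRotar_cell3 _ N hN s6l s6r k l hk.1 (by omega) hl.1 (by omega)]
      rw [pvRotar_cell3 _ N hN s3l s3r l ((N : Int) - 1 - k) hl.1 (by omega) (by omega) (by omega)]
      rw [pvRotar_cell3 grilla N hN hg hrow ((N : Int) - 1 - k) ((N : Int) - 1 - l) (by omega) (by omega) (by omega) (by omega)]
      have he : (N : Int) - 1 - ((N : Int) - 1 - k) = k := by omega
      rw [he]
      simp only [pvCelda]
      norm_num
    cases hdir : direccion == 2 with
    | false =>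
      simp only [Bool.false_eq_true, if_false, List.foldl]
      rw [p0, p1, p2, p3]
    | true =>
      simp only [if_true, List.foldl]
      rw [p0, p3, q2, q1]
  · -- tamano ≤ 0: the matrix is empty and every pass appends nothing
    have hnil : PySem.List.pyRange 0 tamano 1 = [] := PySem.List.pyRange_one_eq_nil (by omega)
    cases hdir : direccion == 2 with
    | false => simp only [h4, Bool.false_eq_true, if_false, pvEncolar, hnil, List.foldl]
    | true => simp only [h4, if_true, pvEncolar, hnil, List.foldl]
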